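-- pv_equiv track=rewrite | github.com/hridaygoswami/final-project | finalProject/DevOpsStats/views.py | detect_technology
-- ===== SOURCE A (Python) =====
-- def detect_technology(file_extensions):
--     reactjs_extensions = {".jsx", ".js"}
--     nextjs_extensions = {".jsx", ".js", ".tsx", ".ts"}
--     vuejs_extensions = {".vue"}
--     django_extensions = {".py"}
--     flask_extensions = {".py"}
--     data_science_extensions = {".ipynb", ".py"}
--     data_analytics_extensions = {".sql", ".csv", ".xlsx"}
--     machine_learning_extensions = {".ipynb", ".py"}
--
--     if any(ext in reactjs_extensions for ext in file_extensions):
--         return "reactjs"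
--     elif any(ext in nextjs_extensions for ext in file_extensions):
--         return "nextjs"
--     elif any(ext in vuejs_extensions for ext in file_extensions):
--         return "vuejs"
--     elif any(ext in django_extensions for ext in file_extensions):
--         return "django"
--     elif any(ext in flask_extensions for ext in file_extensions):
--         return "flask"
--     elif any(ext in data_science_extensions for ext in file_extensions):
--         return "data_science"
--     elif any(ext in data_analytics_extensions for ext in file_extensions):
--         return "data_analytics"
--     elif any(ext in machine_learning_extensions for ext in file_extensions):
--         return "machine_learning"
--     else:
--         return "error"
-- ===== SOURCE B (Python) =====
-- def detect_technology(file_extensions):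
--     categories = [
--         ("reactjs", {".jsx", ".js"}),
--         ("nextjs", {".jsx", ".js", ".tsx", ".ts"}),
--         ("vuejs", {".vue"}),
--         ("django", {".py"}),
--         ("flask", {".py"}),
--         ("data_science", {".ipynb", ".py"}),
--         ("data_analytics", {".sql", ".csv", ".xlsx"}),
--         ("machine_learning", {".ipynb", ".py"}),
--     ]
--     best = len(categories)  # sentinel: nothing matched yet -> "error"
--     for ext in file_extensions:
--         for i, (_, exts) in enumerate(categories):
--             if i >= best:
--                 break
--             if ext in exts:
--                 best = i
--                 break
--         if best == 0:
--             break
--     return categories[best][0] if best < len(categories) else "error"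
-- ===== Notes on version B (the rewrite author's own statement) =====
-- stated objective: alternative
-- what changed: Replaces A's eight sequential any()-scans over the whole input with a single pass that tracks, via an ordered (label, extension-set) table, the minimum priority index matched so far (short-circuiting once the top priority is hit).
import Mathlib
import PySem

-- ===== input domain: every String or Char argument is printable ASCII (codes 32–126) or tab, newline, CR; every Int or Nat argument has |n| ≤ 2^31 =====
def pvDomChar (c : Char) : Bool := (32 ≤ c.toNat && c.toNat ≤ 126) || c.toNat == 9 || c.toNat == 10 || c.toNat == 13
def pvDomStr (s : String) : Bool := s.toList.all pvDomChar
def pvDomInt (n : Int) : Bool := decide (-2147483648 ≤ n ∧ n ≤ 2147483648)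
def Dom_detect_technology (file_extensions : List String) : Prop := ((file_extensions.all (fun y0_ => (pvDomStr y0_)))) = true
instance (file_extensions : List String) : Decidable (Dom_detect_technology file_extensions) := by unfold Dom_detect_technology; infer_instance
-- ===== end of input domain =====

-- B replaces A's eight sequential any()-scans by one pass tracking the minimum matched
-- priority index over an ordered category table (alternative decomposition, same result).

-- ===== PORT A =====
def detect_technology (file_extensions : List String) : String :=
  let reactjs_extensions : PySem.Set String := PySem.Set.ofList [".jsx", ".js"]
  let nextjs_extensions : PySem.Set String := PySem.Set.ofList [".jsx", ".js", ".tsx", ".ts"]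
  let vuejs_extensions : PySem.Set String := PySem.Set.ofList [".vue"]
  let django_extensions : PySem.Set String := PySem.Set.ofList [".py"]
  let flask_extensions : PySem.Set String := PySem.Set.ofList [".py"]
  let data_science_extensions : PySem.Set String := PySem.Set.ofList [".ipynb", ".py"]
  let data_analytics_extensions : PySem.Set String := PySem.Set.ofList [".sql", ".csv", ".xlsx"]
  let machine_learning_extensions : PySem.Set String := PySem.Set.ofList [".ipynb", ".py"]
  if file_extensions.any (fun ext => PySem.Set.contains reactjs_extensions ext) then "reactjs"
  else if file_extensions.any (fun ext => PySem.Set.contains nextjs_extensions ext) then "nextjs"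
  else if file_extensions.any (fun ext => PySem.Set.contains vuejs_extensions ext) then "vuejs"
  else if file_extensions.any (fun ext => PySem.Set.contains django_extensions ext) then "django"
  else if file_extensions.any (fun ext => PySem.Set.contains flask_extensions ext) then "flask"
  else if file_extensions.any (fun ext => PySem.Set.contains data_science_extensions ext) then "data_science"
  else if file_extensions.any (fun ext => PySem.Set.contains data_analytics_extensions ext) then "data_analytics"
  else if file_extensions.any (fun ext => PySem.Set.contains machine_learning_extensions ext) then "machine_learning"
  else "error"

-- ===== PORT B =====
-- the ordered (label, extension-set) table of Source B
def pvCats : List (String × PySem.Set String) :=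
  [("reactjs", PySem.Set.ofList [".jsx", ".js"]),
   ("nextjs", PySem.Set.ofList [".jsx", ".js", ".tsx", ".ts"]),
   ("vuejs", PySem.Set.ofList [".vue"]),
   ("django", PySem.Set.ofList [".py"]),
   ("flask", PySem.Set.ofList [".py"]),
   ("data_science", PySem.Set.ofList [".ipynb", ".py"]),
   ("data_analytics", PySem.Set.ofList [".sql", ".csv", ".xlsx"]),
   ("machine_learning", PySem.Set.ofList [".ipynb", ".py"])]

-- inner loop of Source B: `for i, (_, exts) in enumerate(categories)` with its two breaks
def pvInner (ext : String) (best : Nat) : Nat → List (String × PySem.Set String) → Nat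
  | _, [] => best
  | i, (_, exts) :: rest =>
      if best ≤ i then best
      else if PySem.Set.contains exts ext then i
      else pvInner ext best (i + 1) rest

-- outer loop of Source B, with its `if best == 0: break`
def pvOuter : List String → Nat → Nat
  | [], best => best
  | ext :: rest, best =>
      let best' := pvInner ext best 0 pvCats
      if best' = 0 then best' else pvOuter rest best'

def detect_technology_alt (file_extensions : List String) : String :=
  let best := pvOuter file_extensions pvCats.length
  if best < pvCats.length then (pvCats.getD best ("error", [])).1 else "error"

-- ===== PRECONDITION & SPEC =====
def Spec_detect_technology (file_extensions : List String) (out : String) : Prop := out = detect_technology_alt file_extensions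
instance (file_extensions : List String) (out : String) : Decidable (Spec_detect_technology file_extensions out) := by unfold Spec_detect_technology; infer_instance

-- ===== CLAIM (what is proved, stated in full; the proofs are below) =====
def Claim_equal_detect_technology : Prop := ∀ (file_extensions : List String), Dom_detect_technology file_extensions → Spec_detect_technology file_extensions (detect_technology file_extensions)

-- ===== LEMMAS AND PROOFS =====

-- the priority index of a single extension: first category containing it, 8 if none
def pvF (ext : String) : Nat :=
  if ext ∈ [".jsx", ".js"] then 0
  else if ext ∈ [".jsx", ".js", ".tsx", ".ts"] then 1
  else if ext ∈ [".vue"] then 2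
  else if ext ∈ [".py"] then 3
  else if ext ∈ [".ipynb", ".py"] then 5
  else if ext ∈ [".sql", ".csv", ".xlsx"] then 6
  else 8

-- minimum priority index over a list
def pvMinf : List String → Nat
  | [] => 8
  | x :: xs => min (pvF x) (pvMinf xs)

theorem pvF_ne (ext : String) : pvF ext ≠ 4 ∧ pvF ext ≠ 7 := by
  unfold pvF; split_ifs <;> omega

theorem pvMinf_le (xs : List String) : pvMinf xs ≤ 8 := by
  induction xs with
  | nil => simp [pvMinf]
  | cons x xs ih => simp [pvMinf]; omega

theorem pvMinf_lb (xs : List String) : ∀ x ∈ xs, pvMinf xs ≤ pvF x := by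
  induction xs with
  | nil => simp
  | cons y ys ih =>
      intro x hx
      rcases List.mem_cons.mp hx with h | h
      · subst h; simp [pvMinf]
      · simp [pvMinf]; exact Or.inr (ih x h)

theorem pvMinf_attain (xs : List String) : pvMinf xs = 8 ∨ ∃ x ∈ xs, pvF x = pvMinf xs := by
  induction xs with
  | nil => exact Or.inl rfl
  | cons y ys ih =>
      by_cases h : pvF y ≤ pvMinf ys
      · refine Or.inr ⟨y, List.mem_cons_self, ?_⟩
        simp [pvMinf]; omega
      · rcases ih with h8 | ⟨x, hx, hfx⟩
        · exact Or.inl (by simp only [pvMinf]; omega)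
        · refine Or.inr ⟨x, List.mem_cons_of_mem _ hx, ?_⟩
          simp [pvMinf]; omega

-- membership in A's j-th set bounds pvF
theorem pvMem0 (x : String) (h : x ∈ ([".jsx", ".js"] : List String)) : pvF x = 0 := by
  simp [pvF, h]
theorem pvMem1 (x : String) (h : x ∈ ([".jsx", ".js", ".tsx", ".ts"] : List String)) : pvF x ≤ 1 := by
  unfold pvF; split_ifs <;> simp_all
theorem pvMem2 (x : String) (h : x ∈ ([".vue"] : List String)) : pvF x = 2 := by
  simp at h; subst h; decide
theorem pvMem3 (x : String) (h : x ∈ ([".py"] : List String)) : pvF x = 3 := by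
  simp at h; subst h; decide
theorem pvMem5 (x : String) (h : x ∈ ([".ipynb", ".py"] : List String)) : pvF x ≤ 5 := by
  rcases List.mem_cons.mp h with h | h
  · subst h; decide
  · simp at h; subst h; decide
theorem pvMem6 (x : String) (h : x ∈ ([".sql", ".csv", ".xlsx"] : List String)) : pvF x = 6 := by
  rcases List.mem_cons.mp h with h | h
  · subst h; decide
  rcases List.mem_cons.mp h with h | h
  · subst h; decide
  · simp at h; subst h; decide

-- pvF x = j implies membership in the j-th set
theorem pvFmem (x : String) :
    (pvF x = 0 → x ∈ ([".jsx", ".js"] : List String)) ∧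
    (pvF x = 1 → x ∈ ([".jsx", ".js", ".tsx", ".ts"] : List String)) ∧
    (pvF x = 2 → x ∈ ([".vue"] : List String)) ∧
    (pvF x = 3 → x ∈ ([".py"] : List String)) ∧
    (pvF x = 5 → x ∈ ([".ipynb", ".py"] : List String)) ∧
    (pvF x = 6 → x ∈ ([".sql", ".csv", ".xlsx"] : List String)) := by
  unfold pvF; split_ifs <;> simp_all

-- the common characterisation: both programs return pvLabel (pvMinf xs)
def pvLabel : Nat → String
  | 0 => "reactjs" | 1 => "nextjs" | 2 => "vuejs" | 3 => "django"
  | 4 => "flask" | 5 => "data_science" | 6 => "data_analytics"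
  | 7 => "machine_learning" | _ => "error"

-- A equals the characterisation
theorem pvA_eq (xs : List String) : detect_technology xs = pvLabel (pvMinf xs) := by
  have hub := pvMinf_le xs
  have hlb := pvMinf_lb xs
  have none_of_lt : ∀ (s : List String) (c : Nat), (∀ x, x ∈ s → pvF x ≤ c) → c < pvMinf xs →
      xs.any (fun ext => PySem.Set.contains (PySem.Set.ofList s) ext) = false := by
    intro s c hs hc
    rw [List.any_eq_false]
    intro x hx hcx
    have hmem : x ∈ s := by
      simpa [PySem.Set.contains_iff, PySem.Set.mem_ofList] using hcx
    have := hs x hmem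
    have := hlb x hx
    omega
  have some_of : ∀ (s : List String), (∃ x ∈ xs, x ∈ s) →
      xs.any (fun ext => PySem.Set.contains (PySem.Set.ofList s) ext) = true := by
    intro s ⟨x, hx, hm⟩
    rw [List.any_eq_true]
    exact ⟨x, hx, by simpa [PySem.Set.contains_iff, PySem.Set.mem_ofList] using hm⟩
  rcases pvMinf_attain xs with h8 | ⟨x, hx, hfx⟩
  · -- nothing matches: every any is false
    unfold detect_technology
    dsimp only
    rw [none_of_lt _ 0 (fun x h => (pvMem0 x h).le) (by omega),
        none_of_lt _ 1 (fun x h => pvMem1 x h) (by omega),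
        none_of_lt _ 2 (fun x h => (pvMem2 x h).le) (by omega),
        none_of_lt _ 3 (fun x h => (pvMem3 x h).le) (by omega),
        none_of_lt _ 5 (fun x h => pvMem5 x h) (by omega),
        none_of_lt _ 6 (fun x h => (pvMem6 x h).le) (by omega)]
    simp [h8, pvLabel]
  · have hm := pvFmem x
    have hf4 := pvF_ne x
    interval_cases hmv : (pvMinf xs)
    · unfold detect_technology
      dsimp only
      rw [some_of _ ⟨x, hx, hm.1 (by omega)⟩]
      simp [pvLabel]
    · unfold detect_technology
      dsimp only
      rw [none_of_lt _ 0 (fun x h => (pvMem0 x h).le) (by omega),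
          some_of _ ⟨x, hx, hm.2.1 (by omega)⟩]
      simp [pvLabel]
    · unfold detect_technology
      dsimp only
      rw [none_of_lt _ 0 (fun x h => (pvMem0 x h).le) (by omega),
          none_of_lt _ 1 (fun x h => pvMem1 x h) (by omega),
          some_of _ ⟨x, hx, hm.2.2.1 (by omega)⟩]
      simp [pvLabel]
    · unfold detect_technology
      dsimp only
      rw [none_of_lt _ 0 (fun x h => (pvMem0 x h).le) (by omega),
          none_of_lt _ 1 (fun x h => pvMem1 x h) (by omega),
          none_of_lt _ 2 (fun x h => (pvMem2 x h).le) (by omega),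
          some_of _ ⟨x, hx, hm.2.2.2.1 (by omega)⟩]
      simp [pvLabel]
    · omega
    · unfold detect_technology
      dsimp only
      rw [none_of_lt _ 0 (fun x h => (pvMem0 x h).le) (by omega),
          none_of_lt _ 1 (fun x h => pvMem1 x h) (by omega),
          none_of_lt _ 2 (fun x h => (pvMem2 x h).le) (by omega),
          none_of_lt _ 3 (fun x h => (pvMem3 x h).le) (by omega),
          some_of _ ⟨x, hx, hm.2.2.2.2.1 (by omega)⟩]
      simp [pvLabel]
    · unfold detect_technology
      dsimp only
      rw [none_of_lt _ 0 (fun x h => (pvMem0 x h).le) (by omega),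
          none_of_lt _ 1 (fun x h => pvMem1 x h) (by omega),
          none_of_lt _ 2 (fun x h => (pvMem2 x h).le) (by omega),
          none_of_lt _ 3 (fun x h => (pvMem3 x h).le) (by omega),
          none_of_lt _ 5 (fun x h => pvMem5 x h) (by omega),
          some_of _ ⟨x, hx, hm.2.2.2.2.2 (by omega)⟩]
      simp [pvLabel]
    · omega
    · unfold detect_technology
      dsimp only
      rw [none_of_lt _ 0 (fun x h => (pvMem0 x h).le) (by omega),
          none_of_lt _ 1 (fun x h => pvMem1 x h) (by omega),
          none_of_lt _ 2 (fun x h => (pvMem2 x h).le) (by omega),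
          none_of_lt _ 3 (fun x h => (pvMem3 x h).le) (by omega),
          none_of_lt _ 5 (fun x h => pvMem5 x h) (by omega),
          none_of_lt _ 6 (fun x h => (pvMem6 x h).le) (by omega)]
      simp [pvLabel]

-- B's inner loop computes min best (pvF ext)
set_option maxHeartbeats 1000000 in
theorem pvInner_eq (ext : String) (best : Nat) (hb : best ≤ 8) :
    pvInner ext best 0 pvCats = min best (pvF ext) := by
  simp only [pvCats, pvInner, pvF, PySem.Set.contains_iff, PySem.Set.mem_ofList]
  by_cases h0 : ext ∈ ([".jsx", ".js"] : List String) <;>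
    by_cases h1 : ext ∈ ([".jsx", ".js", ".tsx", ".ts"] : List String) <;>
    by_cases h2 : ext ∈ ([".vue"] : List String) <;>
    by_cases h3 : ext ∈ ([".py"] : List String) <;>
    by_cases h5 : ext ∈ ([".ipynb", ".py"] : List String) <;>
    by_cases h6 : ext ∈ ([".sql", ".csv", ".xlsx"] : List String) <;>
    simp only [h0, h1, h2, h3, h5, h6, if_true, if_false] <;>
    split_ifs <;> omega

-- B's outer loop computes min best (pvMinf xs)
theorem pvOuter_eq (xs : List String) :
    ∀ best, best ≤ 8 → pvOuter xs best = min best (pvMinf xs) := by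
  induction xs with
  | nil => intro best hb; simp only [pvOuter, pvMinf]; omega
  | cons x xs ih =>
      intro best hb
      unfold pvOuter
      rw [pvInner_eq _ _ hb]
      by_cases h : min best (pvF x) = 0
      · rw [if_pos h]; simp only [pvMinf]; omega
      · rw [if_neg h, ih _ (by omega), pvMinf]
        omega

-- B equals the characterisation
theorem pvB_eq (xs : List String) : detect_technology_alt xs = pvLabel (pvMinf xs) := by
  unfold detect_technology_alt
  dsimp only
  rw [pvOuter_eq _ _ (by simp [pvCats])]
  have h := pvMinf_le xs
  have hmin : min pvCats.length (pvMinf xs) = pvMinf xs := by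
    simp [pvCats]; omega
  rw [hmin]
  interval_cases h : (pvMinf xs) <;> rfl

-- ===== VERDICT (by name: the statement is the Claim_ definition above) =====
theorem detect_technology_spec : Claim_equal_detect_technology := by
  intro xs _
  unfold Spec_detect_technology
  rw [pvA_eq, pvB_eq]
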